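-- pv_equiv track=rewrite | github.com/json-0201/10-Days-of-Statistics-HackerRank | day_1-1.py | quartiles
-- ===== SOURCE A (Python) =====
-- def quartiles(arr):
--   # Write your code here
--   left, right, middle = [], [], []  # initialize section arrays
--   n = len(arr)
--   arr.sort() # sort input array
--
--   # if array has single element
--   if n == 1:
--     q1, q2, q3 = arr[0], arr[0], arr[0]
--     return q1, q2, q3
--
--   # if array has even number of elements
--   elif n != 1 and n % 2 == 0:
--     for i in range(int(n/2)):
--       left.append(arr[i])
--       right.append(arr[int(n/2) + i])
--     middle.append(arr[int(n/2) - 1])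
--     middle.append(arr[int(n/2)])
--
--     # even left/right array
--     if len(left) % 2 == 0:
--       q1 = int((left[int(len(left)/2)-1]\
--     +left[int(len(left)/2)])/2)
--       q2 = int((middle[0]+middle[1])/2)
--       q3 = int((right[int(len(right)/2)-1]\
--     +right[int(len(right)/2)])/2)
--
--     # odd left/right array
--     else:
--       q1 = left[int(len(left)/2)]
--       q2 = int((middle[0]+middle[1])/2)
--       q3 = right[int(len(right)/2)]
--
--     return q1, q2, q3
--
--   # if array has odd number of elements
--   else:
--     for i in range(int(n/2)):
--       left.append(arr[i])
--       right.append(arr[int(n/2) + 1 + i])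
--     middle.append(arr[int(n/2)])
--
--     # even left/right array
--     if len(left) % 2 == 0:
--       q1 = int((left[int(len(left)/2)-1]\
--     +left[int(len(left)/2)])/2)
--       q2 = middle[0]
--       q3 = int((right[int(len(right)/2)-1]\
--     +right[int(len(right)/2)])/2)
--
--     # odd left/right array
--     else:
--       q1 = left[int(len(left)/2)]
--       q2 = middle[0]
--       q3 = right[int(len(right)/2)]
--
--     return q1, q2, q3
-- ===== SOURCE B (Python) =====
-- def quartiles(arr):
--   a = sorted(arr)
--   n = len(a)
--   if n == 1:
--     return a[0], a[0], a[0]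
--
--   def med(lo, hi):
--     # median of the sorted segment a[lo:hi], with Python's truncating int()/2
--     m = hi - lo
--     mid = lo + m // 2
--     return a[mid] if m % 2 else int((a[mid - 1] + a[mid]) / 2)
--
--   return med(0, n // 2), med(0, n), med((n + 1) // 2, n)
-- ===== Notes on version B (the rewrite author's own statement) =====
-- stated objective: simpler
-- what changed: B replaces A's per-half populate loops and four duplicated parity branches by one median helper applied to three index ranges of the sorted array (no left/right/middle lists are built); A sorts its argument in place, B does not mutate it (return values proved equal).
import Mathlib
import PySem

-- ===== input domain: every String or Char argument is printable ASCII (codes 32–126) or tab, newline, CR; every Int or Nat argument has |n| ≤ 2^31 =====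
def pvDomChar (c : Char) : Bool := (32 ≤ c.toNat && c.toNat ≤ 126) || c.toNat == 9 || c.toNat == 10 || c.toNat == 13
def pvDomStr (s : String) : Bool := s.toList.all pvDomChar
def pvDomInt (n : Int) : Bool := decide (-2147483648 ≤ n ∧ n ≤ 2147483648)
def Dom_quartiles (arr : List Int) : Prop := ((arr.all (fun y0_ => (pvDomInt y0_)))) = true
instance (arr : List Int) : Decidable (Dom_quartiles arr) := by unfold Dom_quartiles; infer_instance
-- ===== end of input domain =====

-- B computes each quartile by a single median helper over index ranges of the sorted
-- array instead of A's populate loops and duplicated parity branches (objective: simpler).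
-- A sorts its argument in place; B does not mutate it — the equivalence is about return values.

-- ===== PORT A =====
-- literal transliteration of A; int(x/2) is PySem.Int.truncdiv x 2 (exact: |x| < 2^53 on Dom)
def quartiles (arr : List Int) : Int × Int × Int :=
  let n : Int := arr.length
  let s := PySem.List.sorted arr id false          -- arr.sort()
  if n = 1 then
    let q1 := PySem.List.pyGetD s 0 0
    let q2 := PySem.List.pyGetD s 0 0
    let q3 := PySem.List.pyGetD s 0 0
    (q1, q2, q3)
  else if n ≠ 1 ∧ PySem.Int.mod n 2 = 0 then
    let h := PySem.Int.truncdiv n 2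
    let lr := (PySem.List.pyRange 0 h 1).foldl
      (fun (p : List Int × List Int) i =>
        (p.1 ++ [PySem.List.pyGetD s i 0], p.2 ++ [PySem.List.pyGetD s (h + i) 0])) ([], [])
    let left := lr.1
    let right := lr.2
    let middle := [PySem.List.pyGetD s (h - 1) 0, PySem.List.pyGetD s h 0]
    if PySem.Int.mod (left.length : Int) 2 = 0 then
      let q1 := PySem.Int.truncdiv
        (PySem.List.pyGetD left (PySem.Int.truncdiv (left.length : Int) 2 - 1) 0
          + PySem.List.pyGetD left (PySem.Int.truncdiv (left.length : Int) 2) 0) 2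
      let q2 := PySem.Int.truncdiv (PySem.List.pyGetD middle 0 0 + PySem.List.pyGetD middle 1 0) 2
      let q3 := PySem.Int.truncdiv
        (PySem.List.pyGetD right (PySem.Int.truncdiv (right.length : Int) 2 - 1) 0
          + PySem.List.pyGetD right (PySem.Int.truncdiv (right.length : Int) 2) 0) 2
      (q1, q2, q3)
    else
      let q1 := PySem.List.pyGetD left (PySem.Int.truncdiv (left.length : Int) 2) 0
      let q2 := PySem.Int.truncdiv (PySem.List.pyGetD middle 0 0 + PySem.List.pyGetD middle 1 0) 2
      let q3 := PySem.List.pyGetD right (PySem.Int.truncdiv (right.length : Int) 2) 0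
      (q1, q2, q3)
  else
    let h := PySem.Int.truncdiv n 2
    let lr := (PySem.List.pyRange 0 h 1).foldl
      (fun (p : List Int × List Int) i =>
        (p.1 ++ [PySem.List.pyGetD s i 0], p.2 ++ [PySem.List.pyGetD s (h + 1 + i) 0])) ([], [])
    let left := lr.1
    let right := lr.2
    let middle := [PySem.List.pyGetD s h 0]
    if PySem.Int.mod (left.length : Int) 2 = 0 then
      let q1 := PySem.Int.truncdiv
        (PySem.List.pyGetD left (PySem.Int.truncdiv (left.length : Int) 2 - 1) 0
          + PySem.List.pyGetD left (PySem.Int.truncdiv (left.length : Int) 2) 0) 2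
      let q2 := PySem.List.pyGetD middle 0 0
      let q3 := PySem.Int.truncdiv
        (PySem.List.pyGetD right (PySem.Int.truncdiv (right.length : Int) 2 - 1) 0
          + PySem.List.pyGetD right (PySem.Int.truncdiv (right.length : Int) 2) 0) 2
      (q1, q2, q3)
    else
      let q1 := PySem.List.pyGetD left (PySem.Int.truncdiv (left.length : Int) 2) 0
      let q2 := PySem.List.pyGetD middle 0 0
      let q3 := PySem.List.pyGetD right (PySem.Int.truncdiv (right.length : Int) 2) 0
      (q1, q2, q3)

-- ===== PORT B =====
-- med a lo hi = median of the sorted segment a[lo:hi] (Source B's helper `med`)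
def pvMed (a : List Int) (lo hi : Int) : Int :=
  let m := hi - lo
  let mid := lo + PySem.Int.floordiv m 2
  if PySem.Int.mod m 2 ≠ 0 then PySem.List.pyGetD a mid 0
  else PySem.Int.truncdiv (PySem.List.pyGetD a (mid - 1) 0 + PySem.List.pyGetD a mid 0) 2

def quartiles_alt (arr : List Int) : Int × Int × Int :=
  let a := PySem.List.sorted arr id false
  let n : Int := a.length
  if n = 1 then (PySem.List.pyGetD a 0 0, PySem.List.pyGetD a 0 0, PySem.List.pyGetD a 0 0)
  else (pvMed a 0 (PySem.Int.floordiv n 2), pvMed a 0 n,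
        pvMed a (PySem.Int.floordiv (n + 1) 2) n)

-- ===== PRECONDITION & SPEC =====
-- Pre_: A (and B) raise IndexError on the empty list; everything else is admitted.
def Pre_quartiles (arr : List Int) : Prop := arr ≠ []
instance (arr : List Int) : Decidable (Pre_quartiles arr) := by unfold Pre_quartiles; infer_instance
def pvWitness_quartiles : List Int := [3, 1, 2, 4]

def Spec_quartiles (arr : List Int) (out : Int × Int × Int) : Prop := out = quartiles_alt arr
instance (arr : List Int) (out : Int × Int × Int) : Decidable (Spec_quartiles arr out) := by unfold Spec_quartiles; infer_instance

-- ===== CLAIM (what is proved, stated in full; the proofs are below) =====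
def Claim_equal_quartiles : Prop := ∀ (arr : List Int), Dom_quartiles arr → Pre_quartiles arr → Spec_quartiles arr (quartiles arr)

-- ===== LEMMAS AND PROOFS =====

theorem pv_truncdiv_natCast (m : Nat) : PySem.Int.truncdiv (m : Int) 2 = ((m / 2 : Nat) : Int) := by
  have : ((m:Int)).tdiv 2 = (m:Int) / 2 := Int.tdiv_eq_ediv_of_nonneg (by positivity)
  simp [PySem.Int.truncdiv, this]

-- ===== VERDICT (by name: the statement is the Claim_ definition above) =====

theorem pv_fold_pair (h : Int) (f g : Int → Int) :
    (PySem.List.pyRange 0 h 1).foldl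
      (fun (p : List Int × List Int) i => (p.1 ++ [f i], p.2 ++ [g i])) ([], [])
    = ((PySem.List.pyRange 0 h 1).map f, (PySem.List.pyRange 0 h 1).map g) := by
  rw [PySem.List.foldl_prod_mk (fun acc i => acc ++ [f i]) (fun acc i => acc ++ [g i])]
  rw [PySem.List.foldl_append_singleton_eq_map f, PySem.List.foldl_append_singleton_eq_map g]
  simp

-- the branch bodies of the two ports agree, for each parity of the length k of the sorted list
-- even case
theorem pv_even_case (s : List Int) (k : Nat) (hk : 2 ≤ k) (hev : k % 2 = 0) :
    (let h := PySem.Int.truncdiv (k : Int) 2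
    let lr := (PySem.List.pyRange 0 h 1).foldl
      (fun (p : List Int × List Int) i =>
        (p.1 ++ [PySem.List.pyGetD s i 0], p.2 ++ [PySem.List.pyGetD s (h + i) 0])) ([], [])
    let left := lr.1
    let right := lr.2
    let middle := [PySem.List.pyGetD s (h - 1) 0, PySem.List.pyGetD s h 0]
    if PySem.Int.mod (left.length : Int) 2 = 0 then
      let q1 := PySem.Int.truncdiv
        (PySem.List.pyGetD left (PySem.Int.truncdiv (left.length : Int) 2 - 1) 0
          + PySem.List.pyGetD left (PySem.Int.truncdiv (left.length : Int) 2) 0) 2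
      let q2 := PySem.Int.truncdiv (PySem.List.pyGetD middle 0 0 + PySem.List.pyGetD middle 1 0) 2
      let q3 := PySem.Int.truncdiv
        (PySem.List.pyGetD right (PySem.Int.truncdiv (right.length : Int) 2 - 1) 0
          + PySem.List.pyGetD right (PySem.Int.truncdiv (right.length : Int) 2) 0) 2
      (q1, q2, q3)
    else
      let q1 := PySem.List.pyGetD left (PySem.Int.truncdiv (left.length : Int) 2) 0
      let q2 := PySem.Int.truncdiv (PySem.List.pyGetD middle 0 0 + PySem.List.pyGetD middle 1 0) 2
      let q3 := PySem.List.pyGetD right (PySem.Int.truncdiv (right.length : Int) 2) 0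
      (q1, q2, q3))
    = (pvMed s 0 (PySem.Int.floordiv (k:Int) 2), pvMed s 0 (k:Int),
        pvMed s (PySem.Int.floordiv ((k:Int) + 1) 2) (k:Int)) := by
  simp only [pv_fold_pair, pv_truncdiv_natCast]
  simp only [PySem.List.length_pyRange_one, List.length_map, Int.sub_zero, Int.toNat_natCast,
    pvMed, PySem.Int.mod_eq_emod_of_pos (by omega : (0:Int) < 2),
    PySem.Int.floordiv_eq_ediv_of_pos (by omega : (0:Int) < 2)]
  by_cases h2 : k / 2 % 2 = 0
  · rw [if_pos (by omega), if_neg (by omega), if_neg (by omega), if_neg (by omega)]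
    rw [PySem.List.pyGetD_map_pyRange_of_nonneg _ _ _ _ (by omega) (by omega)]
    rw [PySem.List.pyGetD_map_pyRange_of_nonneg _ _ _ _ (by omega) (by omega)]
    rw [PySem.List.pyGetD_map_pyRange_of_nonneg _ _ _ _ (by omega) (by omega)]
    rw [PySem.List.pyGetD_map_pyRange_of_nonneg _ _ _ _ (by omega) (by omega)]
    simp only [PySem.List.pyGetD_zero_cons]
    rw [show ∀ x y : Int, PySem.List.pyGetD [x, y] (1:Int) 0 = y from fun x y => by simp [pysem]]
    rw [show (0:Int) + (k:Int)/2/2 = ((k/2/2 : Nat) : Int) from by omega,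
        show (0:Int) + (k:Int)/2 = ((k/2 : Nat) : Int) from by omega,
        show ((k:Int)+1)/2 + ((k:Int) - ((k:Int)+1)/2)/2 = ((k/2 : Nat):Int) + (((k/2/2:Nat):Int) - 1) + 1 from by omega,
        show ((k/2 : Nat):Int) + (((k/2/2:Nat):Int) - 1) + 1 - 1 = ((k/2 : Nat):Int) + (((k/2/2:Nat):Int) - 1) from by omega,
        show ((k/2 : Nat):Int) + (((k/2/2:Nat):Int) - 1) + 1 = ((k/2 : Nat):Int) + ((k/2/2:Nat):Int) from by omega]
  · rw [if_neg (by omega), if_pos (by omega), if_neg (by omega), if_pos (by omega)]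
    rw [PySem.List.pyGetD_map_pyRange_of_nonneg _ _ _ _ (by omega) (by omega)]
    rw [PySem.List.pyGetD_map_pyRange_of_nonneg _ _ _ _ (by omega) (by omega)]
    simp only [PySem.List.pyGetD_zero_cons]
    rw [show ∀ x y : Int, PySem.List.pyGetD [x, y] (1:Int) 0 = y from fun x y => by simp [pysem]]
    rw [show (0:Int) + (k:Int)/2/2 = ((k/2/2 : Nat) : Int) from by omega,
        show (0:Int) + (k:Int)/2 = ((k/2 : Nat) : Int) from by omega,
        show ((k:Int)+1)/2 + ((k:Int) - ((k:Int)+1)/2)/2 = ((k/2 : Nat):Int) + ((k/2/2:Nat):Int) from by omega]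

-- odd case
theorem pv_odd_case (s : List Int) (k : Nat) (hk : 3 ≤ k) (hodd : k % 2 = 1) :
    (let h := PySem.Int.truncdiv (k : Int) 2
    let lr := (PySem.List.pyRange 0 h 1).foldl
      (fun (p : List Int × List Int) i =>
        (p.1 ++ [PySem.List.pyGetD s i 0], p.2 ++ [PySem.List.pyGetD s (h + 1 + i) 0])) ([], [])
    let left := lr.1
    let right := lr.2
    let middle := [PySem.List.pyGetD s h 0]
    if PySem.Int.mod (left.length : Int) 2 = 0 then
      let q1 := PySem.Int.truncdiv
        (PySem.List.pyGetD left (PySem.Int.truncdiv (left.length : Int) 2 - 1) 0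
          + PySem.List.pyGetD left (PySem.Int.truncdiv (left.length : Int) 2) 0) 2
      let q2 := PySem.List.pyGetD middle 0 0
      let q3 := PySem.Int.truncdiv
        (PySem.List.pyGetD right (PySem.Int.truncdiv (right.length : Int) 2 - 1) 0
          + PySem.List.pyGetD right (PySem.Int.truncdiv (right.length : Int) 2) 0) 2
      (q1, q2, q3)
    else
      let q1 := PySem.List.pyGetD left (PySem.Int.truncdiv (left.length : Int) 2) 0
      let q2 := PySem.List.pyGetD middle 0 0
      let q3 := PySem.List.pyGetD right (PySem.Int.truncdiv (right.length : Int) 2) 0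
      (q1, q2, q3))
    = (pvMed s 0 (PySem.Int.floordiv (k:Int) 2), pvMed s 0 (k:Int),
        pvMed s (PySem.Int.floordiv ((k:Int) + 1) 2) (k:Int)) := by
  simp only [pv_fold_pair, pv_truncdiv_natCast]
  simp only [PySem.List.length_pyRange_one, List.length_map, Int.sub_zero, Int.toNat_natCast,
    pvMed, PySem.Int.mod_eq_emod_of_pos (by omega : (0:Int) < 2),
    PySem.Int.floordiv_eq_ediv_of_pos (by omega : (0:Int) < 2)]
  by_cases h2 : k / 2 % 2 = 0
  · rw [if_pos (by omega), if_neg (by omega), if_pos (by omega), if_neg (by omega)]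
    rw [PySem.List.pyGetD_map_pyRange_of_nonneg _ _ _ _ (by omega) (by omega)]
    rw [PySem.List.pyGetD_map_pyRange_of_nonneg _ _ _ _ (by omega) (by omega)]
    rw [PySem.List.pyGetD_map_pyRange_of_nonneg _ _ _ _ (by omega) (by omega)]
    rw [PySem.List.pyGetD_map_pyRange_of_nonneg _ _ _ _ (by omega) (by omega)]
    simp only [PySem.List.pyGetD_zero_cons]
    rw [show (0:Int) + (k:Int)/2/2 = ((k/2/2 : Nat) : Int) from by omega,
        show (0:Int) + (k:Int)/2 = ((k/2 : Nat) : Int) from by omega,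
        show ((k:Int)+1)/2 + ((k:Int) - ((k:Int)+1)/2)/2 = ((k/2 : Nat):Int) + 1 + (((k/2/2:Nat):Int) - 1) + 1 from by omega,
        show ((k/2 : Nat):Int) + 1 + (((k/2/2:Nat):Int) - 1) + 1 - 1 = ((k/2 : Nat):Int) + 1 + (((k/2/2:Nat):Int) - 1) from by omega,
        show ((k/2 : Nat):Int) + 1 + (((k/2/2:Nat):Int) - 1) + 1 = ((k/2 : Nat):Int) + 1 + ((k/2/2:Nat):Int) from by omega]
  · rw [if_neg (by omega), if_pos (by omega), if_pos (by omega), if_pos (by omega)]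
    rw [PySem.List.pyGetD_map_pyRange_of_nonneg _ _ _ _ (by omega) (by omega)]
    rw [PySem.List.pyGetD_map_pyRange_of_nonneg _ _ _ _ (by omega) (by omega)]
    simp only [PySem.List.pyGetD_zero_cons]
    rw [show (0:Int) + (k:Int)/2/2 = ((k/2/2 : Nat) : Int) from by omega,
        show (0:Int) + (k:Int)/2 = ((k/2 : Nat) : Int) from by omega,
        show ((k:Int)+1)/2 + ((k:Int) - ((k:Int)+1)/2)/2 = ((k/2 : Nat):Int) + 1 + ((k/2/2:Nat):Int) from by omega]

theorem quartiles_spec : Claim_equal_quartiles := by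
  intro arr _ hpre
  have hpos : 0 < arr.length := List.length_pos_of_ne_nil hpre
  unfold Spec_quartiles
  simp only [quartiles, quartiles_alt]
  rw [PySem.List.length_sorted arr id false]
  obtain ⟨k, hk⟩ : ∃ k, arr.length = k := ⟨_, rfl⟩
  rw [hk]
  rw [hk] at hpos
  by_cases h1 : (k : Int) = 1
  · rw [if_pos h1, if_pos h1]
  · have hmod := PySem.Int.mod_eq_emod_of_pos (a := (k : Int)) (by omega : (0:Int) < 2)
    rw [if_neg h1, if_neg h1]
    by_cases h2 : k % 2 = 0
    · rw [if_pos (⟨h1, by omega⟩ : (k:Int) ≠ 1 ∧ PySem.Int.mod (k:Int) 2 = 0)]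
      exact pv_even_case (PySem.List.sorted arr id false) k (by omega) h2
    · rw [if_neg (by omega)]
      exact pv_odd_case (PySem.List.sorted arr id false) k (by omega) (by omega)
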